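-- pv_equiv track=rewrite | github.com/TheMatrix888/ExamTemplates | unsorted/unknown.py | transform
-- ===== SOURCE A (Python) =====
-- def transform(equation, base, value):
--     result = 0
--     for digit in equation:
--         result *= base
--         if digit == "x" or digit == "y":
--             result += value
--         else:
--             result += int(digit)
--     return result
-- ===== SOURCE B (Python) =====
-- def transform(equation, base, value):
--     result = 0
--     power = 1
--     for digit in reversed(equation):
--         if digit == "x" or digit == "y":
--             result += power * value
--         else:
--             result += power * int(digit)
--         power *= base
--     return result
-- ===== Notes on version B (the rewrite author's own statement) =====
-- stated objective: alternative
-- what changed: Replaces Horner's left-to-right multiply-accumulate with a right-to-left single pass that sums explicit place values via a running power accumulator.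
import Mathlib
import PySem

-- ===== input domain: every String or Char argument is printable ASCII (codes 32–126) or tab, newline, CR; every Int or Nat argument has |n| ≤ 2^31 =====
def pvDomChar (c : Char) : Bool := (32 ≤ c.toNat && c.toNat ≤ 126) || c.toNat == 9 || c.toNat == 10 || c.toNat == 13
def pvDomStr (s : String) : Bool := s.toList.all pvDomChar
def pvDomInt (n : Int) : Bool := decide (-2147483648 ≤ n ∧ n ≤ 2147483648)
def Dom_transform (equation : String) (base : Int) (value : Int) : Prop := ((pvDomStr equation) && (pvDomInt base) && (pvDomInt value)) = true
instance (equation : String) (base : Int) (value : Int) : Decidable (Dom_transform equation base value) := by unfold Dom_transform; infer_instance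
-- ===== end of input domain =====

-- B re-evaluates the digit string right-to-left as an explicit sum of place values
-- (running power accumulator) instead of A's Horner multiply-accumulate; same cost,
-- different decomposition.

-- value of one character: 'x'/'y' → value, otherwise int(digit)
-- (PySem.Int.ofStr? is none exactly where Python's int(digit) raises; Pre_ excludes those)
def pvCharVal (value : Int) (c : Char) : Int :=
  if c = 'x' ∨ c = 'y' then value else (PySem.Int.ofStr? (String.ofList [c])).getD 0

-- ===== PORT A =====
def transform (equation : String) (base : Int) (value : Int) : Int :=
  equation.toList.foldl (fun result digit => result * base + pvCharVal value digit) 0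

-- ===== PORT B =====
-- loop over the reversed character list carrying (result, power)
def pvGo (base value : Int) : List Char → Int × Int → Int × Int
  | [], st => st
  | c :: cs, (res, pow) => pvGo base value cs (res + pow * pvCharVal value c, pow * base)

def transform_alt (equation : String) (base : Int) (value : Int) : Int :=
  (pvGo base value equation.toList.reverse (0, 1)).1

-- ===== PRECONDITION & SPEC =====
-- Pre_ excludes exactly the inputs on which Python A raises ValueError:
-- a character that is neither 'x' nor 'y' nor a decimal digit makes int(digit) raise.
def Pre_transform (equation : String) (base : Int) (value : Int) : Prop :=
  equation.toList.all (fun c => c == 'x' || c == 'y' || c.isDigit) = true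
instance (equation : String) (base : Int) (value : Int) : Decidable (Pre_transform equation base value) := by unfold Pre_transform; infer_instance

def pvWitness_transform : String × Int × Int := ("1x0y2", 10, 7)

def Spec_transform (equation : String) (base : Int) (value : Int) (out : Int) : Prop := out = transform_alt equation base value
instance (equation : String) (base : Int) (value : Int) (out : Int) : Decidable (Spec_transform equation base value out) := by unfold Spec_transform; infer_instance

-- ===== CLAIM (what is proved, stated in full; the proofs are below) =====
def Claim_equal_transform : Prop := ∀ (equation : String) (base : Int) (value : Int), Dom_transform equation base value → Pre_transform equation base value → Spec_transform equation base value (transform equation base value)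

-- ===== LEMMAS AND PROOFS =====

theorem pvGo_append (b v : Int) (xs ys : List Char) (st : Int × Int) :
    pvGo b v (xs ++ ys) st = pvGo b v ys (pvGo b v xs st) := by
  induction xs generalizing st with
  | nil => rfl
  | cons c cs ih => cases st; simp [pvGo, ih]

theorem pvGo_snd (b v : Int) (xs : List Char) (st : Int × Int) :
    (pvGo b v xs st).2 = st.2 * b ^ xs.length := by
  induction xs generalizing st with
  | nil => simp [pvGo]
  | cons c cs ih => cases st; simp [pvGo, ih]; ring

theorem horner_eq_go (b v : Int) (l : List Char) (r : Int) :
    l.foldl (fun result digit => result * b + pvCharVal v digit) r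
      = r * b ^ l.length + (pvGo b v l.reverse (0, 1)).1 := by
  induction l generalizing r with
  | nil => simp [pvGo]
  | cons c cs ih =>
      simp only [List.foldl, List.reverse_cons, List.length_cons]
      rw [ih, pvGo_append]
      have h2 := pvGo_snd b v cs.reverse (0, 1)
      rcases hst : pvGo b v cs.reverse (0, 1) with ⟨res, pow⟩
      rw [hst] at h2
      simp only [pvGo] at *
      simp only [List.length_reverse] at h2
      simp only [h2]
      ring

-- ===== VERDICT (by name: the statement is the Claim_ definition above) =====
theorem transform_spec : Claim_equal_transform := by
  intro equation base value _ _
  show transform equation base value = transform_alt equation base value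
  unfold transform transform_alt
  rw [horner_eq_go]
  simp
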